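-- pv_equiv track=rewrite | github.com/drmysore/open3d-ibr-defect-extraction | src/rule_engine.py | _pair_count_exceeded
-- ===== SOURCE A (Python) =====
-- def _get(d: dict, key: str, default=None):
--     """Retrieve *key* from *d*, treating ``None`` values as *default*."""
--     v = d.get(key, default)
--     return default if v is None else v
--
-- def _pair_count_exceeded(
--
--     defect: dict,
--     peers: list[dict],
--     rule_areas: set[str],
--     max_per_pair: int,
-- ) -> bool:
--     """Check whether any pair of adjacent areas exceeds *max_per_pair*."""
--     sorted_areas = sorted(rule_areas)
--     for i, a1 in enumerate(sorted_areas):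
--         for a2 in sorted_areas[i + 1:]:
--             pair = {a1, a2}
--             count = 0
--             d_zones = set(_get(defect, "zone_ids", []))
--             if d_zones.intersection(pair):
--                 count += 1
--             for p in peers:
--                 p_zones = set(_get(p, "zone_ids", []))
--                 if p_zones.intersection(pair):
--                     count += 1
--             if count > max_per_pair:
--                 return True
--     return False
-- ===== SOURCE B (Python) =====
-- def _pair_count_exceeded(
--     defect: dict,
--     peers: list[dict],
--     rule_areas: set[str],
--     max_per_pair: int,
-- ) -> bool:
--     """Check whether any pair of adjacent areas exceeds *max_per_pair*.
--
--     Re-implementation: the zone set of every record is built ONCE, per-area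
--     hit counts are precomputed, and each pair's count is obtained by
--     inclusion-exclusion (hits(a1) + hits(a2) - both) instead of rebuilding
--     every record's zone set and intersecting it for every pair.
--     """
--     zone_sets = []
--     for d in [defect] + peers:
--         z = d.get("zone_ids")
--         zone_sets.append(set(z) if z is not None else set())
--     area_hits = [(a, sum(1 for zs in zone_sets if a in zs))
--                  for a in sorted(rule_areas)]
--     for i, (a1, h1) in enumerate(area_hits):
--         for (a2, h2) in area_hits[i + 1:]:
--             both = sum(1 for zs in zone_sets if a1 in zs and a2 in zs)
--             if h1 + h2 - both > max_per_pair: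
--                 return True
--     return False
-- ===== Notes on version B (the rewrite author's own statement) =====
-- stated objective: faster
-- what changed: B builds every record's zone set once and precomputes per-area hit counts, then gets each pair's count by inclusion-exclusion (hits(a1)+hits(a2)-both) instead of rebuilding all zone sets and intersecting them for every pair.
import Mathlib
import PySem

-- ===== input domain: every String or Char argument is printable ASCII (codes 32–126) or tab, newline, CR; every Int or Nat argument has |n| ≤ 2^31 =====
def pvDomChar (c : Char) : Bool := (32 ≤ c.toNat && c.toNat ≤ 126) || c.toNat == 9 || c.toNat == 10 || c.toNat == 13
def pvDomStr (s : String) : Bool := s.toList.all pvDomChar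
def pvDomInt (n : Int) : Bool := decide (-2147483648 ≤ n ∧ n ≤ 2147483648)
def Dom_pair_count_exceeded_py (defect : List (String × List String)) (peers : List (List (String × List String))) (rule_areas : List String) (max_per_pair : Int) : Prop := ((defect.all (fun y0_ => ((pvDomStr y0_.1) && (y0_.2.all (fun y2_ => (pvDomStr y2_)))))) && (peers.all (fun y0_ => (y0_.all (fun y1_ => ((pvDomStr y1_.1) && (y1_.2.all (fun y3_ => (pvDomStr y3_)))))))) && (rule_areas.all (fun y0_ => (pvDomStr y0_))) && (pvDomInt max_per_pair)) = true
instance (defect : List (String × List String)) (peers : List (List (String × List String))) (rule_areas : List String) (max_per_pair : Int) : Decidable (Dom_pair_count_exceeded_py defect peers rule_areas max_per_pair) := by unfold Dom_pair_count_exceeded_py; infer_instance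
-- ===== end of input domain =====

-- ===== PORT A =====
-- B precomputes zone sets and per-area hit counts once and counts each pair by
-- inclusion-exclusion instead of rebuilding and intersecting every zone set per pair (faster).

-- helper for A: _get(d, key, default) — a stored Python None is not representable for values of
-- type list[str], so only the missing-key branch of _get is reachable; exact there.
def pvGetA (d : List (String × List String)) (key : String) (default : List String) : List String :=
  match (PySem.Dict.mk d).get? key with
  | some v => v
  | none => default

-- port of A: for each pair (a1, a2) of sorted areas, rebuild every record's zone set,
-- count records whose set intersects {a1, a2}, early-return on count > max_per_pair.
def pair_count_exceeded_py (defect : List (String × List String)) (peers : List (List (String × List String))) (rule_areas : List String) (max_per_pair : Int) : Bool :=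
  let sorted_areas := PySem.List.sorted rule_areas (fun x => x) false
  (PySem.List.enumerate sorted_areas 0).any (fun ia =>
    (PySem.List.slice sorted_areas (some (ia.1 + 1)) none).any (fun a2 =>
      let a1 := ia.2
      let pair : PySem.Set String := PySem.Set.ofList [a1, a2]
      let count : Int := 0
      let d_zones : PySem.Set String := PySem.Set.ofList (pvGetA defect "zone_ids" [])
      let count : Int := if !(PySem.Set.inter d_zones pair).isEmpty then count + 1 else count
      let count : Int := peers.foldl (fun c p =>
        let p_zones : PySem.Set String := PySem.Set.ofList (pvGetA p "zone_ids" [])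
        if !(PySem.Set.inter p_zones pair).isEmpty then c + 1 else c) count
      decide (count > max_per_pair)))

-- ===== PORT B =====
-- port of B (Source B): zone sets built once, per-area hit counts, inclusion-exclusion per pair.
def pair_count_exceeded_py_alt (defect : List (String × List String)) (peers : List (List (String × List String))) (rule_areas : List String) (max_per_pair : Int) : Bool :=
  let zone_sets : List (PySem.Set String) :=
    ([defect] ++ peers).map (fun d =>
      match (PySem.Dict.mk d).get? "zone_ids" with
      | some z => PySem.Set.ofList z
      | none => PySem.Set.empty)
  let area_hits : List (String × Int) :=
    (PySem.List.sorted rule_areas (fun x => x) false).map (fun a =>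
      (a, (zone_sets.map (fun zs => if zs.contains a then (1 : Int) else 0)).sum))
  (PySem.List.enumerate area_hits 0).any (fun ih =>
    (PySem.List.slice area_hits (some (ih.1 + 1)) none).any (fun ah2 =>
      let both : Int := (zone_sets.map (fun zs =>
        if zs.contains ih.2.1 && zs.contains ah2.1 then (1 : Int) else 0)).sum
      decide (ih.2.2 + ah2.2 - both > max_per_pair)))

-- ===== PRECONDITION & SPEC =====
def Spec_pair_count_exceeded_py (defect : List (String × List String)) (peers : List (List (String × List String))) (rule_areas : List String) (max_per_pair : Int) (out : Bool) : Prop := out = pair_count_exceeded_py_alt defect peers rule_areas max_per_pair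
instance (defect : List (String × List String)) (peers : List (List (String × List String))) (rule_areas : List String) (max_per_pair : Int) (out : Bool) : Decidable (Spec_pair_count_exceeded_py defect peers rule_areas max_per_pair out) := by unfold Spec_pair_count_exceeded_py; infer_instance

-- ===== CLAIM (what is proved, stated in full; the proofs are below) =====
def Claim_equal_pair_count_exceeded_py : Prop := ∀ (defect : List (String × List String)) (peers : List (List (String × List String))) (rule_areas : List String) (max_per_pair : Int), Dom_pair_count_exceeded_py defect peers rule_areas max_per_pair → Spec_pair_count_exceeded_py defect peers rule_areas max_per_pair (pair_count_exceeded_py defect peers rule_areas max_per_pair)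

-- ===== LEMMAS AND PROOFS =====

-- the zone set both programs attach to a record d
def pvZset (d : List (String × List String)) : PySem.Set String :=
  PySem.Set.ofList (pvGetA d "zone_ids" [])

-- A's per-pair count, already expressed as a countP over defect :: peers
def pvCount (defect : List (String × List String)) (peers : List (List (String × List String))) (a1 a2 : String) : Int :=
  ((defect :: peers).countP (fun d => (pvZset d).contains a1 || (pvZset d).contains a2) : Int)

-- the common canonical form both ports are reduced to
def pvCanon (defect : List (String × List String)) (peers : List (List (String × List String))) (rule_areas : List String) (max_per_pair : Int) : Bool :=
  let S := PySem.List.sorted rule_areas (fun x => x) false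
  (PySem.List.enumerate S 0).any (fun ia =>
    (PySem.List.slice S (some (ia.1 + 1)) none).any (fun a2 =>
      decide (pvCount defect peers ia.2 a2 > max_per_pair)))

-- B's match-based zone set equals A's pvGetA-based one
lemma pvZset_match (d : List (String × List String)) :
    (match (PySem.Dict.mk d).get? "zone_ids" with
      | some z => PySem.Set.ofList z
      | none => (PySem.Set.empty : PySem.Set String)) = pvZset d := by
  unfold pvZset pvGetA
  cases (PySem.Dict.mk d).get? "zone_ids" <;> rfl

-- "zone set intersects {a1, a2}" is "a1 in zones or a2 in zones"
lemma inter_pair_nonempty (zs : PySem.Set String) (a1 a2 : String) :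
    (!(PySem.Set.inter zs (PySem.Set.ofList [a1, a2])).isEmpty)
      = (zs.contains a1 || zs.contains a2) := by
  rw [Bool.eq_iff_iff]
  simp [PySem.Set.inter, PySem.Set.mem_ofList, PySem.Set.contains_eq_listContains]
  constructor
  · rintro ⟨x, hx, h⟩
    by_cases hx1 : x = a1
    · exact Or.inl (hx1 ▸ hx)
    · exact Or.inr ((h hx1) ▸ hx)
  · rintro (h | h)
    · exact ⟨a1, h, fun hn => absurd rfl hn⟩
    · exact ⟨a2, h, fun _ => rfl⟩

-- inclusion-exclusion for countP over one list
lemma countP_or_add_and {α : Type} (p q : α → Bool) (l : List α) :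
    l.countP (fun x => p x || q x) + l.countP (fun x => p x && q x)
      = l.countP p + l.countP q := by
  induction l with
  | nil => simp
  | cons x t ih =>
    by_cases hp : p x = true <;> by_cases hq : q x = true <;>
      simp [hp, hq] <;> omega

-- enumerate commutes with map
lemma enumerate_map {α β : Type} (f : α → β) (xs : List α) (s : Int) :
    PySem.List.enumerate (xs.map f) s
      = (PySem.List.enumerate xs s).map (fun p => (p.1, f p.2)) := by
  induction xs generalizing s with
  | nil => simp [PySem.List.enumerate_nil]
  | cons x t ih => simp [PySem.List.enumerate_cons, ih]

-- an open-ended slice commutes with map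
lemma slice_map {α β : Type} (f : α → β) (xs : List α) (a : Int) :
    PySem.List.slice (xs.map f) (some a) none
      = (PySem.List.slice xs (some a) none).map f := by
  rw [PySem.List.slice_some_none, PySem.List.slice_some_none, List.length_map,
    List.map_drop]

-- A reduces to the canonical form
lemma A_eq_canon (defect : List (String × List String)) (peers : List (List (String × List String))) (rule_areas : List String) (max_per_pair : Int) :
    pair_count_exceeded_py defect peers rule_areas max_per_pair
      = pvCanon defect peers rule_areas max_per_pair := by
  unfold pair_count_exceeded_py pvCanon
  refine List.any_congr rfl (fun ia => ?_)
  refine List.any_congr rfl (fun a2 => ?_)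
  simp only [inter_pair_nonempty]
  rw [PySem.List.foldl_count_if (fun p =>
    (PySem.Set.ofList (pvGetA p "zone_ids" [])).contains ia.2
      || (PySem.Set.ofList (pvGetA p "zone_ids" [])).contains a2)]
  unfold pvCount pvZset
  rw [decide_eq_decide, List.countP_cons]
  by_cases h : ((PySem.Set.ofList (pvGetA defect "zone_ids" [])).contains ia.2
      || (PySem.Set.ofList (pvGetA defect "zone_ids" [])).contains a2) = true <;>
    simp only [h, if_true, if_false, Bool.false_eq_true] <;> push_cast <;> omega

-- B reduces to the canonical form
lemma B_eq_canon (defect : List (String × List String)) (peers : List (List (String × List String))) (rule_areas : List String) (max_per_pair : Int) :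
    pair_count_exceeded_py_alt defect peers rule_areas max_per_pair
      = pvCanon defect peers rule_areas max_per_pair := by
  unfold pair_count_exceeded_py_alt pvCanon
  simp only [pvZset_match, List.singleton_append, enumerate_map, List.any_map, slice_map]
  refine List.any_congr rfl (fun ia => ?_)
  simp only [Function.comp_apply]
  refine List.any_congr rfl (fun a2 => ?_)
  simp only [Function.comp_apply, List.map_map, Function.comp_def]
  rw [PySem.List.sum_map_ite_one_zero, PySem.List.sum_map_ite_one_zero,
    PySem.List.sum_map_ite_one_zero]
  unfold pvCount
  rw [decide_eq_decide]
  have h := countP_or_add_and (fun d => (pvZset d).contains ia.2) (fun d => (pvZset d).contains a2) (defect :: peers)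
  omega

-- ===== VERDICT (by name: the statement is the Claim_ definition above) =====
theorem pair_count_exceeded_py_spec : Claim_equal_pair_count_exceeded_py := by
  intro defect peers rule_areas max_per_pair _dom
  unfold Spec_pair_count_exceeded_py
  rw [A_eq_canon, B_eq_canon]
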